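-- pv_equiv track=rewrite | github.com/SNManja/Haskell-Python-Algo1 | TP2-cms/filasParecidas.py | filasParecidas
-- ===== SOURCE A (Python) =====
-- from typing import List
--
-- def filasParecidas(matriz: List[List[int]]) -> bool :
--   for i in range(len(matriz)):
--     if i == 0: continue
--     elif i == 1: saveDif = matriz[i][0] - matriz[i-1][0]
--     for j in range(len(matriz[0])):
--       if(matriz[i][j] - saveDif != matriz[i-1][j]):
--         return False
--   return True
-- ===== SOURCE B (Python) =====
-- from typing import List
--
-- def filasParecidas(matriz: List[List[int]]) -> bool:
--     if len(matriz) < 2: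
--         return True
--     base = matriz[0]
--     k = len(base)
--     d = matriz[1][0] - base[0]
--     return all(matriz[i][:k] == [x + i * d for x in base]
--                for i in range(1, len(matriz)))
-- ===== Notes on version B (the rewrite author's own statement) =====
-- stated objective: alternative
-- what changed: B checks each row's k-prefix against a closed-form expected row (first row shifted by i*d) via list equality, instead of A's stateful scan comparing every element to the previous row with an accumulated saveDif.
-- outside the precondition, e.g. on filasParecidas([[0, 0], [5, 5], [1]]): A returns False, B returns False
import Mathlib
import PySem

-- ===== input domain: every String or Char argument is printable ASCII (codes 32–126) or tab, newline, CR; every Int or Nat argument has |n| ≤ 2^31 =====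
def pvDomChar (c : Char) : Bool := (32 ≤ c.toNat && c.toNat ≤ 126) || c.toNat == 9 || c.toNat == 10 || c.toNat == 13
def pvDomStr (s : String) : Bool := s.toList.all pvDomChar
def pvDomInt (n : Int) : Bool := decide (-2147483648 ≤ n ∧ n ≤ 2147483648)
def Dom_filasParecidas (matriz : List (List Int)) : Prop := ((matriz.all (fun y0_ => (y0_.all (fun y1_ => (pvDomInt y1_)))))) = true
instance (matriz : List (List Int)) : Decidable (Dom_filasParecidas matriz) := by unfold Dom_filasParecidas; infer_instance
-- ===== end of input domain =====

-- B replaces A's previous-row comparison (with accumulated saveDif) by a list-equality check of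
-- each row's k-prefix against the closed-form expected row (first row shifted by i*d): alternative decomposition.

-- ===== PORT A =====
-- xs[i] under Pre_ (index always in range there); default only makes the function total
def pvGetI (xs : List Int) (i : Int) : Int := (PySem.List.pyGet? xs i).getD 0
def pvGetRow (matriz : List (List Int)) (i : Int) : List Int := (PySem.List.pyGet? matriz i).getD []

def pvRowOkA (matriz : List (List Int)) (m : Nat) (i saveDif : Int) : Bool :=
  (PySem.List.pyRange 0 (m : Int) 1).all (fun j =>
    pvGetI (pvGetRow matriz i) j - saveDif == pvGetI (pvGetRow matriz (i - 1)) j)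

def pvLoopA (matriz : List (List Int)) (m : Nat) : List Int → Int → Bool
  | [], _ => true
  | i :: rest, saveDif =>
    if i == 0 then pvLoopA matriz m rest saveDif
    else
      let saveDif := if i == 1 then
          pvGetI (pvGetRow matriz 1) 0 - pvGetI (pvGetRow matriz 0) 0
        else saveDif
      if pvRowOkA matriz m i saveDif then pvLoopA matriz m rest saveDif else false

def filasParecidas (matriz : List (List Int)) : Bool :=
  pvLoopA matriz (pvGetRow matriz 0).length
    (PySem.List.pyRange 0 (matriz.length : Int) 1) 0

-- ===== PORT B =====
def filasParecidas_alt (matriz : List (List Int)) : Bool :=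
  if matriz.length < 2 then true
  else
    let base := pvGetRow matriz 0
    let k := base.length
    let d := pvGetI (pvGetRow matriz 1) 0 - pvGetI base 0
    (PySem.List.pyRange 1 (matriz.length : Int) 1).all (fun i =>
      PySem.List.slice (pvGetRow matriz i) none (some (k : Int)) == base.map (fun x => x + i * d))

-- ===== PRECONDITION & SPEC =====
-- Pre_ excludes ragged matrices (≥2 rows with the first row empty, or some row shorter than the
-- first): on those A raises IndexError, except for a few where A returns False early before
-- reaching the short row — a shape condition cannot separate those from the raising ones,
-- so they are excluded too (see claim cites).
def Pre_filasParecidas (matriz : List (List Int)) : Prop :=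
  matriz.length < 2 ∨
    (matriz.headD [] ≠ [] ∧ ∀ row ∈ matriz, (matriz.headD []).length ≤ row.length)
instance (matriz : List (List Int)) : Decidable (Pre_filasParecidas matriz) := by
  unfold Pre_filasParecidas; infer_instance

def pvWitness_filasParecidas : List (List Int) := [[1, 2], [3, 4]]

def Spec_filasParecidas (matriz : List (List Int)) (out : Bool) : Prop := out = filasParecidas_alt matriz
instance (matriz : List (List Int)) (out : Bool) : Decidable (Spec_filasParecidas matriz out) := by unfold Spec_filasParecidas; infer_instance

-- ===== CLAIM (what is proved, stated in full; the proofs are below) =====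
def Claim_equal_filasParecidas : Prop := ∀ (matriz : List (List Int)), Dom_filasParecidas matriz → Pre_filasParecidas matriz → Spec_filasParecidas matriz (filasParecidas matriz)

-- ===== LEMMAS AND PROOFS =====

-- A's loop, once past i = 0 and i = 1, never changes saveDif: it is just `all`.
theorem pvLoopA_all (matriz : List (List Int)) (m : Nat) (d : Int) (l : List Int)
    (h : ∀ x ∈ l, x ≠ 0 ∧ x ≠ 1) :
    pvLoopA matriz m l d = l.all (fun i => pvRowOkA matriz m i d) := by
  induction l with
  | nil => rfl
  | cons i rest ih =>
    obtain ⟨h0, h1⟩ := h i (by simp)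
    have ih' := ih (fun x hx => h x (by simp [hx]))
    by_cases hro : pvRowOkA matriz m i d
    · simp [pvLoopA, h0, h1, hro, ih']
    · simp [pvLoopA, h0, h1, hro]

-- the telescoping core: consecutive-difference d ↔ closed form from row 0
theorem pvTelescope (g : Nat → Nat → Int) (n k : Nat) (d : Int) :
    (∀ i, 1 ≤ i → i < n → ∀ j, j < k → g i j = g (i - 1) j + d) ↔
      (∀ i, i < n → ∀ j, j < k → g i j = g 0 j + (i : Int) * d) := by
  constructor
  · intro h i
    induction i with
    | zero => intro _ j _; simp
    | succ i ih =>
      intro hin j hj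
      have h1 := h (i + 1) (by omega) hin j hj
      have h2 := ih (by omega) j hj
      simp only [Nat.add_sub_cancel] at h1
      rw [h1, h2]; push_cast; ring
  · intro h i h1 h2 j hj
    have ha := h i h2 j hj
    have hb := h (i - 1) (by omega) j hj
    rw [ha, hb]
    have : ((i - 1 : Nat) : Int) = (i : Int) - 1 := by omega
    rw [this]; ring

-- element access under Pre_: pvGetI over a Nat cast is getD
theorem pvGetI_natCast (xs : List Int) (j : Nat) : pvGetI xs (j : Int) = xs.getD j 0 := by
  simp [pvGetI, PySem.List.pyGet?_natCast, List.getD]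

theorem pvGetRow_natCast (matriz : List (List Int)) (i : Nat) :
    pvGetRow matriz (i : Int) = matriz.getD i [] := by
  simp [pvGetRow, PySem.List.pyGet?_natCast, List.getD]

theorem pvGetRow_zero (matriz : List (List Int)) : pvGetRow matriz 0 = matriz.headD [] := by
  rw [show (0 : Int) = ((0 : Nat) : Int) by norm_num, pvGetRow_natCast]
  cases matriz <;> rfl

-- inner loop of A as a pointwise Prop
theorem pvRowOkA_iff (matriz : List (List Int)) (m : Nat) (i : Nat) (d : Int) :
    pvRowOkA matriz m (i : Int) d = true ↔
      (∀ j, j < m → (pvGetRow matriz i).getD j 0 = (pvGetRow matriz ((i : Int) - 1)).getD j 0 + d) := by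
  simp only [pvRowOkA, PySem.List.pyRange_one, List.all_map, Function.comp, List.all_eq_true,
    List.mem_range, Int.sub_zero, Int.toNat_natCast, zero_add, beq_iff_eq, pvGetI_natCast]
  constructor
  · intro h j hj
    have := h j hj
    omega
  · intro h j hj
    have := h j hj
    omega

-- ===== VERDICT (by name: the statement is the Claim_ definition above) =====
theorem filasParecidas_spec : Claim_equal_filasParecidas := by
  intro matriz _ hpre
  unfold Spec_filasParecidas filasParecidas filasParecidas_alt
  by_cases hn : matriz.length < 2
  · -- both trivially true
    rw [if_pos hn]
    rcases matriz with _ | ⟨r, _ | ⟨s, t⟩⟩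
    · decide
    · rw [show (([r] : List (List Int)).length : Int) = 1 by simp,
          PySem.List.pyRange_one_cons (by norm_num), PySem.List.pyRange_one_eq_nil (by norm_num)]
      simp [pvLoopA]
    · simp at hn
  · rw [if_neg hn]
    -- n ≥ 2; Pre gives the shape facts
    have hshape : matriz.headD [] ≠ [] ∧ ∀ row ∈ matriz, (matriz.headD []).length ≤ row.length := by
      rcases hpre with h | h
      · omega
      · exact h
    set n := matriz.length with hn'
    have h2n : 2 ≤ n := by omega
    set k := (pvGetRow matriz 0).length with hk
    set d := pvGetI (pvGetRow matriz 1) 0 - pvGetI (pvGetRow matriz 0) 0 with hd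
    -- unfold A's loop over 0 :: 1 :: rest
    have e1 : PySem.List.pyRange 0 (n : Int) 1 = 0 :: 1 :: PySem.List.pyRange 2 (n : Int) 1 := by
      rw [PySem.List.pyRange_one_cons (show (0:Int) < (n:Int) by omega),
          show (0:Int) + 1 = 1 by norm_num,
          PySem.List.pyRange_one_cons (show (1:Int) < (n:Int) by omega),
          show (1:Int) + 1 = 2 by norm_num]
    rw [e1]
    have hstep : pvLoopA matriz k (0 :: 1 :: PySem.List.pyRange 2 (n : Int) 1) 0 =
        (if pvRowOkA matriz k 1 d then pvLoopA matriz k (PySem.List.pyRange 2 (n : Int) 1) d else false) := by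
      simp [pvLoopA, hd]
    rw [hstep]
    have hrest : ∀ x ∈ PySem.List.pyRange 2 (n : Int) 1, x ≠ 0 ∧ x ≠ 1 := by
      intro x hx
      rw [PySem.List.mem_pyRange_one] at hx
      constructor <;> omega
    have hsplit : (PySem.List.pyRange 1 (n : Int) 1) = 1 :: PySem.List.pyRange 2 (n : Int) 1 := by
      rw [PySem.List.pyRange_one_cons (show (1:Int) < (n:Int) by omega),
          show (1:Int) + 1 = 2 by norm_num]
    have hA : (if pvRowOkA matriz k 1 d then pvLoopA matriz k (PySem.List.pyRange 2 (n : Int) 1) d else false) =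
        (PySem.List.pyRange 1 (n : Int) 1).all (fun i => pvRowOkA matriz k i d) := by
      rw [hsplit, List.all_cons, pvLoopA_all matriz k d _ hrest]
      by_cases hr1 : pvRowOkA matriz k 1 d <;> simp [hr1]
    rw [hA]
    -- now both sides are `all` over pyRange 1 n; prove equality of the Bools via the Prop iff
    apply Bool.coe_iff_coe.mp
    simp only [List.all_eq_true, PySem.List.mem_pyRange_one]
    -- switch to Nat-indexed row access g
    have hrowlen : ∀ i : Nat, i < n → k ≤ (pvGetRow matriz (i : Int)).length := by
      intro i hi
      rw [pvGetRow_natCast]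
      have hil : i < matriz.length := hi
      have hmem : matriz.getD i [] ∈ matriz := by
        rw [List.getD_eq_getElem _ _ hil]
        exact List.getElem_mem hil
      have hle := hshape.2 _ hmem
      rw [hk, pvGetRow_zero]
      omega
    set g : Nat → Nat → Int := fun i j => (pvGetRow matriz (i : Int)).getD j 0 with hg
    have hiffA : (∀ i : Int, 1 ≤ i → i < (n : Int) → pvRowOkA matriz k i d = true) ↔
        (∀ i : Nat, 1 ≤ i → i < n → ∀ j, j < k → g i j = g (i - 1) j + d) := by
      constructor
      · intro h i h1 h2 j hj
        have hthis := (pvRowOkA_iff matriz k i d).mp (h i (by exact_mod_cast h1) (by exact_mod_cast h2)) j hj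
        simp only [hg]
        rw [show ((i - 1 : Nat) : Int) = (i : Int) - 1 by omega]
        exact hthis
      · intro h i h1 h2
        lift i to Nat using (by omega)
        apply (pvRowOkA_iff matriz k i d).mpr
        intro j hj
        have hi1 : (1 : Nat) ≤ i := by exact_mod_cast h1
        have hthis := h i hi1 (by exact_mod_cast h2) j hj
        simp only [hg] at hthis
        rw [show ((i : Int) - 1) = ((i - 1 : Nat) : Int) by omega]
        exact hthis
    have hiffB : (∀ i : Int, 1 ≤ i → i < (n : Int) →
          (PySem.List.slice (pvGetRow matriz i) none (some (k : Int)) ==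
            (pvGetRow matriz 0).map (fun x => x + i * d)) = true) ↔
        (∀ i : Nat, i < n → ∀ j, j < k → g i j = g 0 j + (i : Int) * d) := by
      constructor
      · intro h i h2 j hj
        rcases Nat.eq_zero_or_pos i with h0 | h1
        · subst h0; simp [hg]
        · have hquot := h i (by exact_mod_cast h1) (by exact_mod_cast h2)
          rw [beq_iff_eq, PySem.List.slice_to_natCast] at hquot
          have hlen := hrowlen i h2
          have hpt : ((pvGetRow matriz (i : Int)).take k)[j]'(by simp; omega) =
              ((pvGetRow matriz 0).map (fun x => x + (i : Int) * d))[j]'(by simp; omega) := by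
            congr 1
          simp only [List.getElem_take, List.getElem_map] at hpt
          simp only [hg]
          rw [List.getD_eq_getElem _ _ (by omega), List.getD_eq_getElem _ _ (by omega)]
          exact hpt
      · intro h i h1 h2
        lift i to Nat using (by omega)
        rw [beq_iff_eq, PySem.List.slice_to_natCast]
        have h2' : i < n := by exact_mod_cast h2
        have hlen := hrowlen i h2'
        apply List.ext_getElem
        · simp; omega
        · intro j hj1 hj2
          simp only [List.getElem_take, List.getElem_map]
          have hjk : j < k := by simp at hj1; omega
          have hthis := h i h2' j hjk
          simp only [hg] at hthis
          rw [List.getD_eq_getElem _ _ (by omega), List.getD_eq_getElem _ _ (by omega)] at hthis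
          exact hthis
    constructor
    · intro h i hi
      exact (hiffB.mpr ((pvTelescope g n k d).mp (hiffA.mp (fun x hx1 hx2 =>
        h x ⟨hx1, hx2⟩)))) i (by exact_mod_cast hi.1) hi.2
    · intro h i hi
      exact (hiffA.mpr ((pvTelescope g n k d).mpr (fun x hx1 hx2 =>
        hiffB.mp (fun y hy1 hy2 => h y ⟨hy1, hy2⟩) x hx1 hx2))) i hi.1 hi.2
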